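-- pv_equiv track=rewrite | github.com/nlpsoc/Paraphrase-In-Dialog | src/paraphrase/utility/python_helpers.py | to_dict_of_lists
-- ===== SOURCE A (Python) =====
-- def to_dict_of_lists(data_items):
--     """
--
--     :param data_items:
--     :return:
--     """
--     result_data = {}
--     for item in data_items:
--         for k, v in item.items():
--             if k not in result_data:
--                 result_data[k] = []
--             result_data[k].append(v)
--     return result_data
-- ===== SOURCE B (Python) =====
-- def to_dict_of_lists(data_items):
--     # Two-pass: build the column index (keys in first-appearance order) first,
--     # then fill each column by scanning the items per key.
--     keys = list(dict.fromkeys(k for item in data_items for k in item))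
--     return {k: [item[k] for item in data_items if k in item] for k in keys}
-- ===== Notes on version B (the rewrite author's own statement) =====
-- stated objective: alternative
-- what changed: Instead of one interleaved pass that appends each value into a dict entry as it is met, B first computes the ordered key list (first appearance) and then builds each column with a per-key scan of all items, inverting the loop nesting.
import Mathlib
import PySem

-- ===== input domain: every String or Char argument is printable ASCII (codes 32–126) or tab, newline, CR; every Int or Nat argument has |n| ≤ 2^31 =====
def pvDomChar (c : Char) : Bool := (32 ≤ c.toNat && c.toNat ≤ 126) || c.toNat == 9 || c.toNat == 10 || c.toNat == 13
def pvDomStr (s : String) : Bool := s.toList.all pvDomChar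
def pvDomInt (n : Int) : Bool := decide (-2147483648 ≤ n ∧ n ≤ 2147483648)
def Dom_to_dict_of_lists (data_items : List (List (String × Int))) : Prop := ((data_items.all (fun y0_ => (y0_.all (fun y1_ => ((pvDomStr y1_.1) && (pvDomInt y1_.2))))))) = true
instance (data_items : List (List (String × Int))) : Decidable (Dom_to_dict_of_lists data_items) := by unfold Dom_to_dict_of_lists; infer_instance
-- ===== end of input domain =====

-- B builds the ordered key list first and then fills each column in a second pass,
-- instead of A's single interleaved append loop (objective: alternative decomposition).

-- ===== PORT A =====
-- one Python loop step: 'if k not in result_data: result_data[k] = []' then 'result_data[k].append(v)'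
def pvStepA (d : PySem.Dict String (List Int)) (p : String × Int) : PySem.Dict String (List Int) :=
  (if d.contains p.1 then d else d.insert p.1 []).modify p.1 [] (fun l => l ++ [p.2])

def to_dict_of_lists (data_items : List (List (String × Int))) : List (String × List Int) :=
  (data_items.foldl (fun d item => item.foldl pvStepA d) PySem.Dict.empty).items

-- ===== PORT B =====
-- 'keys = list(dict.fromkeys(k for item in data_items for k in item))' is PySem.List.dedup;
-- '{k: [item[k] for item in data_items if k in item] for k in keys}' — the guarded
-- 'item[k] if k in item' is List.filterMap of Dict.get? (get? is some exactly when k in item)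
def to_dict_of_lists_alt (data_items : List (List (String × Int))) : List (String × List Int) :=
  ((PySem.List.dedup (data_items.flatMap (fun item => item.map Prod.fst))).foldl
    (fun d k => d.insert k (data_items.filterMap (fun item => (PySem.Dict.mk item).get? k)))
    PySem.Dict.empty).items

-- ===== PRECONDITION & SPEC =====
-- Pre_ excludes only association lists in which one item carries a duplicate key:
-- such a list does not represent any Python dict (A's items are dicts), so no Python
-- input is excluded; A's port would collect both values while B's keeps the first.
def Pre_to_dict_of_lists (data_items : List (List (String × Int))) : Prop :=
  ∀ item ∈ data_items, (item.map Prod.fst).Nodup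
instance (data_items : List (List (String × Int))) : Decidable (Pre_to_dict_of_lists data_items) := by unfold Pre_to_dict_of_lists; infer_instance
def pvWitness_to_dict_of_lists : (List (List (String × Int))) :=
  [[("a", 1), ("b", 2)], [("a", 3)], [], [("c", 4), ("b", 5)]]

def Spec_to_dict_of_lists (data_items : List (List (String × Int))) (out : List (String × List Int)) : Prop := out = to_dict_of_lists_alt data_items
instance (data_items : List (List (String × Int))) (out : List (String × List Int)) : Decidable (Spec_to_dict_of_lists data_items out) := by unfold Spec_to_dict_of_lists; infer_instance

-- ===== CLAIM (what is proved, stated in full; the proofs are below) =====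
def Claim_equal_to_dict_of_lists : Prop := ∀ (data_items : List (List (String × Int))), Dom_to_dict_of_lists data_items → Pre_to_dict_of_lists data_items → Spec_to_dict_of_lists data_items (to_dict_of_lists data_items)

-- ===== LEMMAS AND PROOFS =====

-- A's guarded insert-then-append step is exactly Dict.modify with default [].
theorem pvStepA_eq_modify (d : PySem.Dict String (List Int)) (p : String × Int) :
    pvStepA d p = d.modify p.1 [] (fun l => l ++ [p.2]) := by
  unfold pvStepA
  by_cases h : d.contains p.1 = true
  · rw [if_pos h]
  · simp only [Bool.not_eq_true] at h
    rw [if_neg (by simp [h])]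
    simp only [PySem.Dict.modify, PySem.Dict.getD_insert_self,
      PySem.Dict.insert_insert_self, PySem.Dict.getD_of_not_contains _ _ h]

-- the nested fold over items is a fold over the flattened pair list
theorem foldl_foldl_flatten {α β : Type} (f : β → α → β) :
    ∀ (xss : List (List α)) (b : β),
      xss.foldl (fun d xs => xs.foldl f d) b = (xss.flatMap id).foldl f b := by
  intro xss
  induction xss with
  | nil => intro b; rfl
  | cons xs xss ih => intro b; simp [List.flatMap_cons, List.foldl_append, ih]

theorem flatten_map_fst (data_items : List (List (String × Int))) :
    (data_items.flatMap id).map Prod.fst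
      = data_items.flatMap (fun item => item.map Prod.fst) := by
  simp [List.flatMap_def]

-- one item with Nodup keys: its pairs with key k = the guarded dict lookup
theorem item_filter_eq_get? (k : String) :
    ∀ (item : List (String × Int)), (item.map Prod.fst).Nodup →
      (item.filter (fun p => p.1 == k)).map Prod.snd
        = ((PySem.Dict.mk item).get? k).toList := by
  intro item
  induction item with
  | nil => intro _; rfl
  | cons p rest ih =>
    intro hnd
    simp only [List.map_cons, List.nodup_cons] at hnd
    rw [PySem.Dict.get?_mk_cons]
    by_cases h : p.1 = k
    · subst h
      have hnil : (rest.filter (fun q => q.1 == p.1)) = [] := by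
        rw [List.filter_eq_nil_iff]
        intro q hq hk
        have hm : q.1 ∈ rest.map Prod.fst := List.mem_map_of_mem hq
        rw [eq_of_beq hk] at hm
        exact hnd.1 hm
      simp [hnil]
    · have hb : (p.1 == k) = false := by simpa using h
      simp [hb, ih hnd.2]

-- B's column = A's per-key values from the flattened list
theorem column_eq (data_items : List (List (String × Int)))
    (hPre : ∀ item ∈ data_items, (item.map Prod.fst).Nodup) (k : String) :
    data_items.filterMap (fun item => (PySem.Dict.mk item).get? k)
      = ((data_items.flatMap id).filter (fun p => p.1 == k)).map Prod.snd := by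
  induction data_items with
  | nil => rfl
  | cons it rest ih =>
    simp only [List.filterMap_cons, List.flatMap_cons, id, List.filter_append, List.map_append]
    have hit := item_filter_eq_get? k it (hPre it (by simp))
    have hrest := ih (fun i hi => hPre i (by simp [hi]))
    rw [hit]
    cases hg : (PySem.Dict.mk it).get? k with
    | none => simp [hrest]
    | some v => simp [hrest]

theorem to_dict_of_lists_spec_aux (data_items : List (List (String × Int)))
    (hPre : Pre_to_dict_of_lists data_items) :
    to_dict_of_lists data_items = to_dict_of_lists_alt data_items := by
  unfold to_dict_of_lists to_dict_of_lists_alt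
  have hstep : pvStepA = fun d p => d.modify p.1 [] (fun l => l ++ [p.2]) :=
    funext fun d => funext fun p => pvStepA_eq_modify d p
  rw [foldl_foldl_flatten, hstep]
  -- A side: keys and per-key values of the modify-fold
  have hkeysA : ((data_items.flatMap id).foldl
      (fun d p => d.modify p.1 [] (fun l => l ++ [p.2])) PySem.Dict.empty).keys
      = PySem.Set.ofList ((data_items.flatMap id).map Prod.fst) := by
    rw [PySem.Dict.keys_foldl_modify_key (data_items.flatMap id) Prod.fst []
      (fun _ p => fun l => l ++ [p.2]) PySem.Dict.empty]
    exact PySem.Set.update_nil_left _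
  have hndA : ((data_items.flatMap id).foldl
      (fun d p => d.modify p.1 [] (fun l => l ++ [p.2])) PySem.Dict.empty).keys.Nodup := by
    rw [hkeysA]; exact PySem.Set.nodup_ofList _
  rw [PySem.Dict.items_eq_map_keys _ hndA [], hkeysA]
  -- B side: a fold of inserts over fresh distinct keys appends its pairs
  have hkeys' : PySem.List.dedup (data_items.flatMap (fun item => item.map Prod.fst))
      = PySem.Set.ofList ((data_items.flatMap id).map Prod.fst) := by
    rw [PySem.List.dedup_eq_ofList, flatten_map_fst]
  rw [hkeys']
  rw [PySem.Dict.items_foldl_insert_fresh _ (fun k => k)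
      (fun k => data_items.filterMap (fun item => (PySem.Dict.mk item).get? k))
      PySem.Dict.empty (fun _ _ => by simp)
      (by simp)]
  simp only [PySem.Dict.empty, List.nil_append]
  apply List.map_congr_left
  intro k _
  rw [PySem.Dict.getD_foldl_modify_append, column_eq data_items hPre k]
  have hE : (PySem.Dict.mk [] : PySem.Dict String (List Int)).getD k [] = [] := rfl
  simp [hE]

-- ===== VERDICT (by name: the statement is the Claim_ definition above) =====
theorem to_dict_of_lists_spec : Claim_equal_to_dict_of_lists := by
  intro data_items _ hPre
  exact to_dict_of_lists_spec_aux data_items hPre
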